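-- pv_equiv track=rewrite | github.com/Darshil-Solanki/LeetCode | daily/longestUnequalAdjacentGroupsSubsequence2.py | getWordsInLongestSubsequence
-- ===== SOURCE A (Python) =====
-- from typing import List
--
-- def getWordsInLongestSubsequence(words: List[str], groups: List[int]) -> List[str]:
--
--     def check_hamming_distance(word1, word2):
--         if len(word1)!=len(word2):
--             return False
--
--         diff = 0
--         for c1, c2 in zip(word1, word2):
--             if c1!=c2:
--                 diff  += 1
--             if diff>1: return False
--
--         return True
--
--     n = len(groups)
--     dp = [1]*n
--     prev = [-1]*n
--     max_index = 0
--
--     for i in range(1, n):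
--         for j in range(i):
--             if (check_hamming_distance(words[i], words[j])
--                 and dp[j]+1>dp[i]
--                 and groups[i]!=groups[j]):
--                 dp[i] = dp[j]+1
--                 prev[i] = j
--             if dp[i]>dp[max_index]:
--                 max_index = i
--
--     ans = []
--     while max_index >= 0:
--         ans.append(words[max_index])
--         max_index = prev[max_index]
--
--     ans.reverse()
--     return ans
-- ===== SOURCE B (Python) =====
-- from typing import List
--
-- def getWordsInLongestSubsequence(words: List[str], groups: List[int]) -> List[str]:
--     # Bucket words by single-position wildcard keys so the O(L) per-pair hamming
--     # check disappears: two words are hamming<=1 compatible iff they share a key.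
--     n = len(groups)
--     dp = [1] * n
--     prev = [-1] * n
--     buckets = {}
--     best = 0
--     for i in range(n):
--         w = words[i]
--         keys = [(-1, w)] + [(k, w[:k] + w[k + 1:]) for k in range(len(w))]
--         bd, bj = 0, -1
--         for key in keys:
--             for j in buckets.get(key, ()):
--                 if groups[j] != groups[i] and (dp[j] > bd or (dp[j] == bd and j < bj)):
--                     bd, bj = dp[j], j
--         if bd > 0:
--             dp[i] = bd + 1
--             prev[i] = bj
--         if dp[i] > dp[best]:
--             best = i
--         for key in keys:
--             buckets.setdefault(key, []).append(i)
--     ans = []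
--     i = best
--     while i >= 0:
--         ans.append(words[i])
--         i = prev[i]
--     ans.reverse()
--     return ans
-- ===== Notes on version B (the rewrite author's own statement) =====
-- stated objective: faster
-- what changed: Replaces the O(n^2) all-pairs hamming-distance scan by an incremental index that buckets each word under its L+1 single-position wildcard keys, so each word's DP predecessors are read off its buckets (two equal-length words are hamming<=1 compatible iff they share a key) with an explicit max-dp/min-index tie-break reproducing A's first-found choice.
import Mathlib
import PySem

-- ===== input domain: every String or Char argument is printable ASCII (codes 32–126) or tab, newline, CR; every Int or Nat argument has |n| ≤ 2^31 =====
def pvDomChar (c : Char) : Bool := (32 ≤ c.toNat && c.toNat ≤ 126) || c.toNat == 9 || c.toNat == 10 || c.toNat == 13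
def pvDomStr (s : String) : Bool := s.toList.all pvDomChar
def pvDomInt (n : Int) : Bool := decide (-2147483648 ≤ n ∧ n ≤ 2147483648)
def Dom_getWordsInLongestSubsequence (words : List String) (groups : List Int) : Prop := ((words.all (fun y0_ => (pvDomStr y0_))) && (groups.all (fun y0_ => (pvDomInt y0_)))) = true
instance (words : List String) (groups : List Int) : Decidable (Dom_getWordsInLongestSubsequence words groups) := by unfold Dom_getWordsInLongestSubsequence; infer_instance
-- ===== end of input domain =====

-- B replaces A's O(n^2) all-pairs hamming scan by an index bucketing each word under its
-- single-position wildcard keys, reading DP predecessors off the buckets (faster; measured).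

-- ===== PORT A =====
def pvCheckHammingGo : List (Char × Char) → Int → Bool
  | [], _ => true
  | (c1, c2) :: rest, diff =>
    let diff' := if c1 ≠ c2 then diff + 1 else diff
    if diff' > 1 then false else pvCheckHammingGo rest diff'

def pvCheckHamming (w1 w2 : String) : Bool :=
  if w1.toList.length ≠ w2.toList.length then false
  else pvCheckHammingGo (w1.toList.zip w2.toList) 0

-- body of A's inner `for j in range(i)` loop (state: dp, prev, max_index)
def pvAInner (words : List String) (groups : List Int) (i : Nat)
    (st : List Int × List Int × Nat) (j : Nat) : List Int × List Int × Nat :=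
  let st1 :=
    if pvCheckHamming (words.getD i "") (words.getD j "") &&
       decide (st.1.getD j 0 + 1 > st.1.getD i 0) &&
       (groups.getD i 0 != groups.getD j 0)
    then (st.1.set i (st.1.getD j 0 + 1), st.2.1.set i ((j : Nat) : Int), st.2.2)
    else st
  if st1.1.getD i 0 > st1.1.getD st1.2.2 0 then (st1.1, st1.2.1, i) else st1

-- A's final `while max_index >= 0` reconstruction (prev strictly decreases, so n+1 fuel suffices)
def pvARecon (words : List String) (prev : List Int) : Nat → Int → List String
  | 0, _ => []
  | fuel + 1, m =>
    if m ≥ 0 then words.getD m.toNat "" :: pvARecon words prev fuel (prev.getD m.toNat 0)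
    else []

def getWordsInLongestSubsequence (words : List String) (groups : List Int) : List String :=
  let n := groups.length
  let st := (List.range' 1 (n - 1)).foldl
    (fun st i => (List.range i).foldl (pvAInner words groups i) st)
    (List.replicate n 1, List.replicate n (-1), 0)
  (pvARecon words st.2.1 (n + 1) ((st.2.2 : Nat) : Int)).reverse

-- ===== PORT B =====
-- Source B: keys = [(-1, w)] + [(k, w[:k] + w[k+1:]) for k in range(len(w))]
def pvKeys (w : String) : List (Int × List Char) :=
  ((-1 : Int), w.toList) ::
    (List.range w.toList.length).map
      (fun k => ((k : Int), w.toList.take k ++ w.toList.drop (k + 1)) : Nat → Int × List Char)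

-- body of Source B's `for i in range(n)` loop (state: dp, prev, buckets, best)
def pvBBody (words : List String) (groups : List Int)
    (st : List Int × List Int × PySem.Dict (Int × List Char) (List Nat) × Nat) (i : Nat) :
    List Int × List Int × PySem.Dict (Int × List Char) (List Nat) × Nat :=
  let dp := st.1
  let prev := st.2.1
  let buckets := st.2.2.1
  let best := st.2.2.2
  let keys := pvKeys (words.getD i "")
  let p := keys.foldl (fun p key =>
      (buckets.getD key []).foldl (fun (p : Int × Int) j =>
        if (groups.getD j 0 != groups.getD i 0) &&
           (decide (dp.getD j 0 > p.1) || ((dp.getD j 0 == p.1) && decide ((j : Int) < p.2)))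
        then (dp.getD j 0, (j : Int)) else p) p) ((0 : Int), (-1 : Int))
  let dp' := if p.1 > 0 then dp.set i (p.1 + 1) else dp
  let prev' := if p.1 > 0 then prev.set i p.2 else prev
  let best' := if dp'.getD i 0 > dp'.getD best 0 then i else best
  let buckets' := keys.foldl (fun b key => b.insert key (b.getD key [] ++ [i])) buckets
  (dp', prev', buckets', best')

-- Source B's `while i >= 0` reconstruction
def pvBRecon (words : List String) (prev : List Int) : Nat → Int → List String
  | 0, _ => []
  | fuel + 1, m =>
    if m ≥ 0 then words.getD m.toNat "" :: pvBRecon words prev fuel (prev.getD m.toNat 0)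
    else []

def getWordsInLongestSubsequence_alt (words : List String) (groups : List Int) : List String :=
  let n := groups.length
  let st := (List.range n).foldl (pvBBody words groups)
    (List.replicate n 1, List.replicate n (-1), PySem.Dict.empty, 0)
  (pvBRecon words st.2.1 (n + 1) ((st.2.2.2 : Nat) : Int)).reverse

-- ===== PRECONDITION & SPEC =====
-- Pre_ excludes exactly the inputs where Python A raises IndexError: empty groups
-- (the reconstruction loop indexes into empty lists) and words shorter than groups.
def Pre_getWordsInLongestSubsequence (words : List String) (groups : List Int) : Prop :=
  groups ≠ [] ∧ groups.length ≤ words.length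
instance (words : List String) (groups : List Int) : Decidable (Pre_getWordsInLongestSubsequence words groups) := by unfold Pre_getWordsInLongestSubsequence; infer_instance

def pvWitness_getWordsInLongestSubsequence : List String × List Int := (["bab", "dab", "cab"], [1, 2, 2])

def Spec_getWordsInLongestSubsequence (words : List String) (groups : List Int) (out : List String) : Prop := out = getWordsInLongestSubsequence_alt words groups
instance (words : List String) (groups : List Int) (out : List String) : Decidable (Spec_getWordsInLongestSubsequence words groups out) := by unfold Spec_getWordsInLongestSubsequence; infer_instance

-- ===== CLAIM (what is proved, stated in full; the proofs are below) =====
def Claim_equal_getWordsInLongestSubsequence : Prop := ∀ (words : List String) (groups : List Int), Dom_getWordsInLongestSubsequence words groups → Pre_getWordsInLongestSubsequence words groups → Spec_getWordsInLongestSubsequence words groups (getWordsInLongestSubsequence words groups)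

-- ===== LEMMAS AND PROOFS =====

-- ----- small getD/set helpers -----
theorem pvGetD_set_self (l : List Int) (i : Nat) (a : Int) (h : i < l.length) :
    (l.set i a).getD i 0 = a := by simp [List.getD, h]

theorem pvGetD_set_ne (l : List Int) (i j : Nat) (a : Int) (h : i ≠ j) :
    (l.set i a).getD j 0 = l.getD j 0 := by simp [List.getD, List.getElem?_set_ne h]

theorem pvSet_getD_self (l : List Int) (i : Nat) (h : i < l.length) :
    l.set i (l.getD i 0) = l := by simp [List.getD, List.getElem?_eq_getElem h]

-- ----- the "keep the better (dp, index) pair" fold: an order-independent extremum -----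
def pvStep (p x : Int × Int) : Int × Int :=
  if x.1 > p.1 ∨ (x.1 = p.1 ∧ x.2 < p.2) then x else p

def pvBetter (x p : Int × Int) : Prop := p.1 < x.1 ∨ (x.1 = p.1 ∧ x.2 < p.2)

theorem pvNotBetter_trans {y s r : Int × Int} (h1 : ¬ pvBetter y s) (h2 : ¬ pvBetter s r) :
    ¬ pvBetter y r := by
  unfold pvBetter at *; omega

theorem pvStep_foldl_mem (l : List (Int × Int)) (a : Int × Int) :
    l.foldl pvStep a ∈ a :: l := by
  induction l generalizing a with
  | nil => simp
  | cons x t ih =>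
    have h := ih (pvStep a x)
    have hx : pvStep a x = a ∨ pvStep a x = x := by unfold pvStep; split <;> simp
    simp only [List.foldl_cons]
    rcases List.mem_cons.1 h with h' | h'
    · rcases hx with h2 | h2 <;> rw [h'] <;> simp [h2]
    · simp [h']

theorem pvStep_foldl_max (l : List (Int × Int)) (a : Int × Int) :
    ∀ x ∈ a :: l, ¬ pvBetter x (l.foldl pvStep a) := by
  induction l generalizing a with
  | nil => intro x hx; simp only [List.foldl_nil]; simp at hx; subst hx; unfold pvBetter; omega
  | cons y t ih =>
    intro x hx
    simp only [List.foldl_cons]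
    have ihy := ih (pvStep a y)
    by_cases hb : pvBetter y a
    · have hs : pvStep a y = y := by
        unfold pvBetter at hb; unfold pvStep
        have : y.1 > a.1 ∨ (y.1 = a.1 ∧ y.2 < a.2) := by omega
        simp [this]
      rw [hs] at ihy
      rcases List.mem_cons.1 hx with h' | h'
      · subst h'
        have hxy : ¬ pvBetter x y := by unfold pvBetter at *; omega
        exact pvNotBetter_trans hxy (by rw [hs]; exact ihy y (by simp))
      · rw [hs]; exact ihy x h'
    · have hs : pvStep a y = a := by
        unfold pvBetter at hb; unfold pvStep
        have : ¬ (y.1 > a.1 ∨ (y.1 = a.1 ∧ y.2 < a.2)) := by omega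
        simp [this]
      rw [hs] at ihy
      rcases List.mem_cons.1 hx with h' | h'
      · subst h'; rw [hs]; exact ihy x (by simp)
      · rcases List.mem_cons.1 h' with h2 | h2
        · subst h2
          have hya : ¬ pvBetter x a := hb
          exact pvNotBetter_trans hya (by rw [hs]; exact ihy a (by simp))
        · rw [hs]; exact ihy x (by simp [h2])

theorem pvStep_foldl_eq_of_mem_iff (l1 l2 : List (Int × Int)) (a : Int × Int)
    (h : ∀ x, x ∈ l1 ↔ x ∈ l2) : l1.foldl pvStep a = l2.foldl pvStep a := by
  have m1 := pvStep_foldl_mem l1 a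
  have m2 := pvStep_foldl_mem l2 a
  have x1 := pvStep_foldl_max l1 a
  have x2 := pvStep_foldl_max l2 a
  have h12 : l1.foldl pvStep a ∈ a :: l2 := by
    rcases List.mem_cons.1 m1 with h' | h'
    · simp [h']
    · exact List.mem_cons.2 (Or.inr ((h _).1 h'))
  have h21 : l2.foldl pvStep a ∈ a :: l1 := by
    rcases List.mem_cons.1 m2 with h' | h'
    · simp [h']
    · exact List.mem_cons.2 (Or.inr ((h _).2 h'))
  have n1 := x2 _ h12
  have n2 := x1 _ h21
  unfold pvBetter at n1 n2
  have : (l1.foldl pvStep a).1 = (l2.foldl pvStep a).1 ∧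
      (l1.foldl pvStep a).2 = (l2.foldl pvStep a).2 := by omega
  exact Prod.ext this.1 this.2
-- ----- characterisation of A's hamming check via shared wildcard keys -----
theorem pvGo_iff : ∀ (l : List (Char × Char)) (d : Int), d ≤ 1 →
    (pvCheckHammingGo l d = true ↔ d + (l.countP (fun p => p.1 != p.2) : Int) ≤ 1) := by
  intro l
  induction l with
  | nil => intro d hd; simp [pvCheckHammingGo]; omega
  | cons x t ih =>
    intro d hd
    obtain ⟨c1, c2⟩ := x
    by_cases hc : c1 = c2
    · subst hc
      have h1 : ¬ ((d : Int) > 1) := by omega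
      simp only [pvCheckHammingGo, List.countP_cons]
      simp [h1, ih d hd]
    · by_cases hd1 : (d : Int) + 1 > 1
      · simp only [pvCheckHammingGo, List.countP_cons]
        simp [hc, hd1]
        omega
      · simp only [pvCheckHammingGo, List.countP_cons]
        simp [hc, hd1, ih (d+1) (by omega)]
        omega

theorem pvCountZero : ∀ (l1 l2 : List Char), l1.length = l2.length →
    (((l1.zip l2).countP (fun p => p.1 != p.2)) = 0 ↔ l1 = l2) := by
  intro l1
  induction l1 with
  | nil => intro l2 h; cases l2 <;> simp_all
  | cons a t1 ih =>
    intro l2 h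
    cases l2 with
    | nil => simp at h
    | cons b t2 =>
      simp only [List.length_cons] at h
      simp [List.zip_cons_cons, List.countP_cons, ih t2 (by omega)]
      constructor
      · intro hx; exact ⟨hx.2, hx.1⟩
      · intro hx; exact ⟨hx.2, hx.1⟩

theorem pvHamKeys : ∀ (l1 l2 : List Char), l1.length = l2.length →
    (((l1.zip l2).countP (fun p => p.1 != p.2)) ≤ 1 ↔
      (l1 = l2 ∨ ∃ k, k < l1.length ∧ l1.eraseIdx k = l2.eraseIdx k)) := by
  intro l1
  induction l1 with
  | nil => intro l2 h; cases l2 <;> simp_all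
  | cons a t1 ih =>
    intro l2 h
    cases l2 with
    | nil => simp at h
    | cons b t2 =>
      simp only [List.length_cons] at h
      have ht : t1.length = t2.length := by omega
      by_cases hc : a = b
      · subst hc
        have hL : ((a :: t1).zip (a :: t2)).countP (fun p => p.1 != p.2) =
            (t1.zip t2).countP (fun p => p.1 != p.2) := by
          simp [List.zip_cons_cons]
        rw [hL, ih t2 ht]
        constructor
        · rintro (he | ⟨k, hk, he⟩)
          · left; rw [he]
          · right; exact ⟨k + 1, by simp; omega, by simp [List.eraseIdx_cons_succ, he]⟩
        · rintro (he | ⟨k, hk, he⟩)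
          · left; exact (List.cons.injEq _ _ _ _).mp he |>.2
          · cases k with
            | zero => left; simpa using he
            | succ k => right; exact ⟨k, by simp at hk; omega, by simpa using he⟩
      · have hL : ((a :: t1).zip (b :: t2)).countP (fun p => p.1 != p.2) =
            (t1.zip t2).countP (fun p => p.1 != p.2) + 1 := by
          simp [List.zip_cons_cons, hc]
        rw [hL]
        constructor
        · intro hcount
          have h0 : (t1.zip t2).countP (fun p => p.1 != p.2) = 0 := by omega
          right; exact ⟨0, by simp, by simpa using (pvCountZero t1 t2 ht).1 h0⟩
        · rintro (he | ⟨k, hk, he⟩)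
          · exact absurd ((List.cons.injEq _ _ _ _).mp he).1 hc
          · cases k with
            | zero =>
              have : t1 = t2 := by simpa using he
              have := (pvCountZero t1 t2 ht).2 this
              omega
            | succ k =>
              exact absurd ((List.cons.injEq _ _ _ _).mp (by simpa using he)).1 hc

theorem pvCheckHamming_iff (w1 w2 : String) :
    pvCheckHamming w1 w2 = true ↔
      (w1.toList.length = w2.toList.length ∧
        ((w1.toList.zip w2.toList).countP (fun p => p.1 != p.2)) ≤ 1) := by
  unfold pvCheckHamming
  by_cases hl : w1.toList.length = w2.toList.length
  · rw [if_neg (by simp [hl]), pvGo_iff _ 0 (by norm_num)]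
    constructor
    · intro h; exact ⟨hl, by omega⟩
    · intro h; omega
  · rw [if_pos hl]
    constructor
    · intro h; exact (Bool.false_ne_true h).elim
    · rintro ⟨h, _⟩; exact absurd h hl

theorem pvMem_pvKeys (w : String) (κ : Int × List Char) :
    κ ∈ pvKeys w ↔
      (κ = (-1, w.toList) ∨ ∃ k, k < w.toList.length ∧ κ = ((k : Int), w.toList.eraseIdx k)) := by
  simp [pvKeys, List.mem_map, List.mem_range, ← List.eraseIdx_eq_take_drop_succ]
  constructor
  · rintro (h | ⟨k, hk, he⟩)
    · left; exact h
    · right; exact ⟨k, hk, he.symm⟩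
  · rintro (h | ⟨k, hk, he⟩)
    · left; exact h
    · right; exact ⟨k, hk, he.symm⟩

theorem pvSharedKey_iff (w1 w2 : String) :
    (∃ κ, κ ∈ pvKeys w1 ∧ κ ∈ pvKeys w2) ↔ pvCheckHamming w1 w2 = true := by
  rw [pvCheckHamming_iff]
  constructor
  · rintro ⟨κ, h1, h2⟩
    rw [pvMem_pvKeys] at h1 h2
    rcases h1 with h1 | ⟨k, hk, h1⟩ <;> rcases h2 with h2 | ⟨k', hk', h2⟩
    · rw [h1] at h2
      have he : w1.toList = w2.toList := ((Prod.mk.injEq _ _ _ _).mp h2).2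
      refine ⟨by rw [he], ?_⟩
      rw [(pvCountZero _ _ (by rw [he])).2 he]; omega
    · rw [h1] at h2
      have := ((Prod.mk.injEq _ _ _ _).mp h2).1; omega
    · rw [h1] at h2
      have := ((Prod.mk.injEq _ _ _ _).mp h2).1; omega
    · rw [h1] at h2
      obtain ⟨hkk, he⟩ := (Prod.mk.injEq _ _ _ _).mp h2
      have hk2 : k = k' := by exact_mod_cast hkk
      subst hk2
      have hlen : (w1.toList.eraseIdx k).length = (w2.toList.eraseIdx k).length := by rw [he]
      rw [List.length_eraseIdx_of_lt hk, List.length_eraseIdx_of_lt hk'] at hlen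
      have hleq : w1.toList.length = w2.toList.length := by omega
      exact ⟨hleq, (pvHamKeys _ _ hleq).2 (Or.inr ⟨k, hk, he⟩)⟩
  · rintro ⟨hlen, hcount⟩
    rcases (pvHamKeys _ _ hlen).1 hcount with he | ⟨k, hk, he⟩
    · exact ⟨(-1, w1.toList), (pvMem_pvKeys _ _).2 (Or.inl rfl),
        (pvMem_pvKeys _ _).2 (Or.inl (by rw [he]))⟩
    · exact ⟨((k : Int), w1.toList.eraseIdx k), (pvMem_pvKeys _ _).2 (Or.inr ⟨k, hk, rfl⟩),
        (pvMem_pvKeys _ _).2 (Or.inr ⟨k, by omega, by rw [he]⟩)⟩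
-- ----- keys are distinct; the bucket dictionary after i insertions -----
theorem pvKeys_nodup (w : String) : (pvKeys w).Nodup := by
  unfold pvKeys
  rw [List.nodup_cons]
  constructor
  · intro hmem
    rcases List.mem_map.mp hmem with ⟨k, _, hk⟩
    have : ((k : Nat) : Int) = -1 := ((Prod.mk.injEq _ _ _ _).mp hk).1
    omega
  · refine List.Nodup.map ?_ (List.nodup_range)
    intro a b hab
    have : ((a : Nat) : Int) = ((b : Nat) : Int) := ((Prod.mk.injEq _ _ _ _).mp hab).1
    exact_mod_cast this

theorem pvFoldInsert (ks : List (Int × List Char)) (hk : ks.Nodup) (i : Nat)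
    (b : PySem.Dict (Int × List Char) (List Nat)) (κ : Int × List Char) :
    (ks.foldl (fun b κ' => b.insert κ' (b.getD κ' [] ++ [i])) b).getD κ [] =
      if κ ∈ ks then b.getD κ [] ++ [i] else b.getD κ [] := by
  induction ks generalizing b with
  | nil => simp
  | cons κ0 rest ih =>
    simp only [List.foldl_cons]
    have hk' := List.nodup_cons.mp hk
    rw [ih hk'.2]
    by_cases hmem : κ ∈ rest
    · have hne : κ ≠ κ0 := fun h => hk'.1 (h ▸ hmem)
      rw [PySem.Dict.getD_insert]
      simp [hmem, hne]
    · by_cases he : κ = κ0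
      · subst he
        rw [PySem.Dict.getD_insert]
        simp [hmem]
      · rw [PySem.Dict.getD_insert]
        simp [hmem, he]

theorem pvFoldl_flatMap {α β σ : Type} (l : List α) (f : α → List β) (g : σ → β → σ) (a : σ) :
    l.foldl (fun a x => (f x).foldl g a) a = (l.flatMap f).foldl g a := by
  induction l generalizing a <;> simp_all [List.flatMap_cons]

-- ----- Source B's inline best-candidate scan is the pvStep fold over the group-filtered list -----
theorem pvFoldB_eq (groups dp : List Int) (i : Nat) :
    ∀ (js : List Nat) (p : Int × Int),
      js.foldl (fun (p : Int × Int) j =>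
        if (groups.getD j 0 != groups.getD i 0) &&
           (decide (dp.getD j 0 > p.1) || ((dp.getD j 0 == p.1) && decide ((j : Int) < p.2)))
        then (dp.getD j 0, (j : Int)) else p) p
      = ((js.filter (fun j => groups.getD j 0 != groups.getD i 0)).map
          (fun j => (dp.getD j 0, ((j : Nat) : Int)))).foldl pvStep p := by
  intro js
  induction js with
  | nil => intro p; simp
  | cons j t ih =>
    intro p
    by_cases hg : (groups.getD j 0 != groups.getD i 0) = true
    · by_cases hb : dp.getD j 0 > p.1 ∨ (dp.getD j 0 = p.1 ∧ (j : Int) < p.2)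
      · have hcond : ((groups.getD j 0 != groups.getD i 0) &&
            (decide (dp.getD j 0 > p.1) || ((dp.getD j 0 == p.1) && decide ((j : Int) < p.2)))) = true := by
          rw [Bool.and_eq_true]
          refine ⟨hg, ?_⟩
          rw [Bool.or_eq_true]
          rcases hb with h | ⟨h1, h2⟩
          · exact Or.inl (decide_eq_true h)
          · right
            rw [Bool.and_eq_true]
            exact ⟨beq_iff_eq.mpr h1, decide_eq_true h2⟩
        have hstep : pvStep p (dp.getD j 0, ((j : Nat) : Int)) = (dp.getD j 0, ((j : Nat) : Int)) := by
          unfold pvStep; rw [if_pos hb]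
        rw [List.foldl_cons, if_pos hcond]
        simp only [List.filter_cons, hg, if_true, List.map_cons, List.foldl_cons]
        rw [hstep, ih]
      · have hcond : ((groups.getD j 0 != groups.getD i 0) &&
            (decide (dp.getD j 0 > p.1) || ((dp.getD j 0 == p.1) && decide ((j : Int) < p.2)))) = false := by
          rw [hg, Bool.true_and, Bool.or_eq_false_iff]
          constructor
          · exact decide_eq_false (fun h => hb (Or.inl h))
          · rw [Bool.and_eq_false_iff]
            by_cases h1 : dp.getD j 0 = p.1
            · right; exact decide_eq_false (fun h2 => hb (Or.inr ⟨h1, h2⟩))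
            · left; exact beq_eq_false_iff_ne.mpr h1
        have hstep : pvStep p (dp.getD j 0, ((j : Nat) : Int)) = p := by
          unfold pvStep; rw [if_neg hb]
        rw [List.foldl_cons, if_neg (by rw [hcond]; exact Bool.false_ne_true)]
        simp only [List.filter_cons, hg, if_true, List.map_cons, List.foldl_cons]
        rw [hstep, ih]
    · have hgf : (groups.getD j 0 != groups.getD i 0) = false := by
        revert hg; cases (groups.getD j 0 != groups.getD i 0) <;> simp
      have hcond : ((groups.getD j 0 != groups.getD i 0) &&
          (decide (dp.getD j 0 > p.1) || ((dp.getD j 0 == p.1) && decide ((j : Int) < p.2)))) = false := by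
        rw [hgf, Bool.false_and]
      rw [List.foldl_cons, if_neg (by rw [hcond]; exact Bool.false_ne_true)]
      simp only [List.filter_cons, hgf, Bool.false_eq_true, if_false]
      exact ih p

-- ----- membership in the flattened bucket scan -----
theorem pvMem_flat (words : List String) (i j : Nat) :
    (j ∈ (pvKeys (words.getD i "")).flatMap
        (fun κ => (List.range i).filter (fun j => decide (κ ∈ pvKeys (words.getD j ""))))) ↔
      (j < i ∧ pvCheckHamming (words.getD i "") (words.getD j "") = true) := by
  simp only [List.mem_flatMap, List.mem_filter, List.mem_range, decide_eq_true_eq]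
  constructor
  · rintro ⟨κ, hκi, hj, hκj⟩
    exact ⟨hj, (pvSharedKey_iff _ _).1 ⟨κ, hκi, hκj⟩⟩
  · rintro ⟨hj, hham⟩
    rcases (pvSharedKey_iff _ _).2 hham with ⟨κ, h1, h2⟩
    exact ⟨κ, h1, hj, h2⟩
-- ----- A's candidate predicate and the canonical best-predecessor pair -----
def pvHamOK (words : List String) (groups : List Int) (i j : Nat) : Bool :=
  pvCheckHamming (words.getD i "") (words.getD j "") && (groups.getD i 0 != groups.getD j 0)

def pvCandList (words : List String) (groups dp0 : List Int) (i m : Nat) : List (Int × Int) :=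
  ((List.range m).filter (pvHamOK words groups i)).map (fun j => (dp0.getD j 0, ((j : Nat) : Int)))

def pvQ (words : List String) (groups dp0 : List Int) (i m : Nat) : Int × Int :=
  (pvCandList words groups dp0 i m).foldl pvStep (0, -1)

theorem pvQ_cases (words : List String) (groups dp0 : List Int) (i m : Nat) :
    pvQ words groups dp0 i m = (0, -1) ∨
      ∃ j, j < m ∧ pvHamOK words groups i j = true ∧
        pvQ words groups dp0 i m = (dp0.getD j 0, ((j : Nat) : Int)) := by
  have h := pvStep_foldl_mem (pvCandList words groups dp0 i m) (0, -1)
  rcases List.mem_cons.1 h with h' | h'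
  · exact Or.inl h'
  · rcases List.mem_map.mp h' with ⟨j, hj, he⟩
    rcases List.mem_filter.mp hj with ⟨hjr, hok⟩
    exact Or.inr ⟨j, List.mem_range.mp hjr, hok, he.symm⟩

theorem pvQ_snd_lt (words : List String) (groups dp0 : List Int) (i m : Nat) :
    (pvQ words groups dp0 i m).2 < (m : Int) := by
  rcases pvQ_cases words groups dp0 i m with h | ⟨j, hj, _, h⟩ <;> rw [h] <;> simp
  · omega
  · exact_mod_cast hj

theorem pvCand_succ (words : List String) (groups dp0 : List Int) (i m : Nat) :
    pvCandList words groups dp0 i (m + 1) =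
      pvCandList words groups dp0 i m ++
        (if pvHamOK words groups i m then [(dp0.getD m 0, ((m : Nat) : Int))] else []) := by
  unfold pvCandList
  rw [List.range_succ, List.filter_append, List.map_append]
  congr 1
  by_cases h : pvHamOK words groups i m = true <;> simp [h]

-- ----- A's inner loop over j ∈ range m, in closed form -----
theorem pvAInner_eq (words : List String) (groups : List Int) (i : Nat)
    (dp0 prev0 : List Int) (mx0 : Nat)
    (hdl : i < dp0.length) (hpl : i < prev0.length)
    (hdi : dp0.getD i 0 = 1) (hpi : prev0.getD i 0 = -1)
    (hmx : i = 0 ∨ mx0 < i) (hmd : 1 ≤ dp0.getD mx0 0) :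
    ∀ m, m ≤ i →
      (List.range m).foldl (pvAInner words groups i) (dp0, prev0, mx0) =
        (dp0.set i ((pvQ words groups dp0 i m).1 + 1),
         prev0.set i (pvQ words groups dp0 i m).2,
         if dp0.getD mx0 0 < (pvQ words groups dp0 i m).1 + 1 then i else mx0) := by
  intro m
  induction m with
  | zero =>
    intro _
    have hQ : pvQ words groups dp0 i 0 = (0, -1) := by simp [pvQ, pvCandList]
    rw [List.range_zero, List.foldl_nil, hQ]
    have e1 : dp0.set i (((0 : Int), (-1 : Int)).1 + 1) = dp0 := by
      rw [show ((0 : Int), (-1 : Int)).1 + 1 = dp0.getD i 0 from by rw [hdi]; norm_num]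
      exact pvSet_getD_self _ _ hdl
    have e2 : prev0.set i (((0 : Int), (-1 : Int)).2) = prev0 := by
      rw [show (((0 : Int), (-1 : Int)).2 : Int) = prev0.getD i 0 from by rw [hpi]]
      exact pvSet_getD_self _ _ hpl
    rw [e1, e2, if_neg (by simp only; omega)]
  | succ m ih =>
    intro hm1
    have hmi : m < i := by omega
    have hmxlt : mx0 < i := by rcases hmx with h | h; omega; exact h
    rw [List.range_succ, List.foldl_append, ih (by omega), List.foldl_cons, List.foldl_nil]
    set Qm := pvQ words groups dp0 i m with hQm
    set Q' := pvQ words groups dp0 i (m + 1) with hQ'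
    have hQ2lt : Qm.2 < (m : Int) := pvQ_snd_lt words groups dp0 i m
    have hQsucc : Q' = (if pvHamOK words groups i m then pvStep Qm (dp0.getD m 0, ((m : Nat) : Int)) else Qm) := by
      rw [hQ', hQm]
      unfold pvQ
      rw [pvCand_succ, List.foldl_append]
      by_cases h : pvHamOK words groups i m = true <;> simp [h]
    have hlen : (dp0.set i (Qm.1 + 1)).length = dp0.length := by simp
    have hri : (dp0.set i (Qm.1 + 1)).getD i 0 = Qm.1 + 1 := pvGetD_set_self _ _ _ hdl
    have hrm : (dp0.set i (Qm.1 + 1)).getD m 0 = dp0.getD m 0 := pvGetD_set_ne _ _ _ _ (by omega)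
    -- unfold one step of the inner loop
    unfold pvAInner
    by_cases hok : pvHamOK words groups i m = true
    · have hA : pvCheckHamming (words.getD i "") (words.getD m "") = true :=
        ((Bool.and_eq_true _ _).mp hok).1
      have hC : (groups.getD i 0 != groups.getD m 0) = true :=
        ((Bool.and_eq_true _ _).mp hok).2
      by_cases hgt : dp0.getD m 0 > Qm.1
      · -- strict improvement: dp[i], prev[i] are overwritten
        have hQe : Q' = (dp0.getD m 0, ((m : Nat) : Int)) := by
          rw [hQsucc, if_pos hok]
          unfold pvStep
          rw [if_pos (Or.inl hgt)]
        have hcond : (pvCheckHamming (words.getD i "") (words.getD m "") &&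
            decide ((dp0.set i (Qm.1 + 1)).getD m 0 + 1 > (dp0.set i (Qm.1 + 1)).getD i 0) &&
            (groups.getD i 0 != groups.getD m 0)) = true := by
          rw [hA, hrm, hri, hC]
          simp only [Bool.true_and, Bool.and_true]
          exact decide_eq_true (by omega)
        rw [if_pos hcond, hQe]
        simp only [hrm, List.set_set]
        have h1 : (dp0.set i (dp0.getD m 0 + 1)).getD i 0 = dp0.getD m 0 + 1 :=
          pvGetD_set_self _ _ _ hdl
        by_cases hmx1 : dp0.getD mx0 0 < Qm.1 + 1
        · rw [if_pos hmx1]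
          rw [if_neg (show ¬((dp0.set i (dp0.getD m 0 + 1)).getD i 0 >
              (dp0.set i (dp0.getD m 0 + 1)).getD i 0) from by omega)]
          rw [if_pos (show dp0.getD mx0 0 < dp0.getD m 0 + 1 from by omega)]
        · rw [if_neg hmx1]
          have h2 : (dp0.set i (dp0.getD m 0 + 1)).getD mx0 0 = dp0.getD mx0 0 :=
            pvGetD_set_ne _ _ _ _ (by omega)
          by_cases hmx2 : dp0.getD mx0 0 < dp0.getD m 0 + 1
          · rw [if_pos (show (dp0.set i (dp0.getD m 0 + 1)).getD i 0 >
                (dp0.set i (dp0.getD m 0 + 1)).getD mx0 0 from by rw [h1, h2]; omega)]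
            rw [if_pos hmx2]
          · rw [if_neg (show ¬((dp0.set i (dp0.getD m 0 + 1)).getD i 0 >
                (dp0.set i (dp0.getD m 0 + 1)).getD mx0 0) from by rw [h1, h2]; omega)]
            rw [if_neg hmx2]
      · -- no improvement: state unchanged, and Q' = Qm
        have hQe : Q' = Qm := by
          rw [hQsucc, if_pos hok]
          unfold pvStep
          rw [if_neg (by simp only; omega)]
        have hcond : ¬ ((pvCheckHamming (words.getD i "") (words.getD m "") &&
            decide ((dp0.set i (Qm.1 + 1)).getD m 0 + 1 > (dp0.set i (Qm.1 + 1)).getD i 0) &&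
            (groups.getD i 0 != groups.getD m 0)) = true) := by
          rw [hrm, hri]
          have hd : decide (dp0.getD m 0 + 1 > Qm.1 + 1) = false := decide_eq_false (by omega)
          rw [hd, Bool.and_false, Bool.false_and]
          exact Bool.false_ne_true
        rw [if_neg hcond, hQe]
        by_cases hmx1 : dp0.getD mx0 0 < Qm.1 + 1
        · rw [if_pos hmx1]
          rw [if_neg (show ¬((dp0.set i (Qm.1 + 1)).getD i 0 >
              (dp0.set i (Qm.1 + 1)).getD i 0) from by omega)]
        · rw [if_neg hmx1]
          have h2 : (dp0.set i (Qm.1 + 1)).getD mx0 0 = dp0.getD mx0 0 :=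
            pvGetD_set_ne _ _ _ _ (by omega)
          rw [if_neg (show ¬((dp0.set i (Qm.1 + 1)).getD i 0 >
              (dp0.set i (Qm.1 + 1)).getD mx0 0) from by rw [hri, h2]; omega)]
    · -- not a candidate at all
      have hQe : Q' = Qm := by rw [hQsucc, if_neg hok]
      have hcond : ¬ ((pvCheckHamming (words.getD i "") (words.getD m "") &&
          decide ((dp0.set i (Qm.1 + 1)).getD m 0 + 1 > (dp0.set i (Qm.1 + 1)).getD i 0) &&
          (groups.getD i 0 != groups.getD m 0)) = true) := by
        unfold pvHamOK at hok
        rcases Bool.and_eq_false_iff.mp (Bool.not_eq_true _ ▸ hok : _) with h | h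
        · rw [h, Bool.false_and, Bool.false_and]
          exact Bool.false_ne_true
        · rw [h, Bool.and_false]
          exact Bool.false_ne_true
      rw [if_neg hcond, hQe]
      by_cases hmx1 : dp0.getD mx0 0 < Qm.1 + 1
      · rw [if_pos hmx1]
        rw [if_neg (show ¬((dp0.set i (Qm.1 + 1)).getD i 0 >
            (dp0.set i (Qm.1 + 1)).getD i 0) from by omega)]
      · rw [if_neg hmx1]
        have h2 : (dp0.set i (Qm.1 + 1)).getD mx0 0 = dp0.getD mx0 0 :=
          pvGetD_set_ne _ _ _ _ (by omega)
        rw [if_neg (show ¬((dp0.set i (Qm.1 + 1)).getD i 0 >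
            (dp0.set i (Qm.1 + 1)).getD mx0 0) from by rw [hri, h2]; omega)]
-- ----- Source B's bucket scan computes the same canonical pair -----
theorem pvBScan_eq (words : List String) (groups dp : List Int) (i : Nat)
    (b : PySem.Dict (Int × List Char) (List Nat))
    (hb : ∀ κ, b.getD κ [] = (List.range i).filter (fun j => decide (κ ∈ pvKeys (words.getD j "")))) :
    ((pvKeys (words.getD i "")).foldl (fun p key =>
        (b.getD key []).foldl (fun (p : Int × Int) j =>
          if (groups.getD j 0 != groups.getD i 0) &&
             (decide (dp.getD j 0 > p.1) || ((dp.getD j 0 == p.1) && decide ((j : Int) < p.2)))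
          then (dp.getD j 0, (j : Int)) else p) p) ((0 : Int), (-1 : Int)))
      = pvQ words groups dp i i := by
  rw [PySem.List.foldl_congr_mem _ _
    (fun p key => ((List.range i).filter (fun j => decide (key ∈ pvKeys (words.getD j "")))).foldl
      (fun (p : Int × Int) j =>
        if (groups.getD j 0 != groups.getD i 0) &&
           (decide (dp.getD j 0 > p.1) || ((dp.getD j 0 == p.1) && decide ((j : Int) < p.2)))
        then (dp.getD j 0, (j : Int)) else p) p) _
    (fun acc x _ => by rw [hb x])]
  rw [pvFoldl_flatMap]
  rw [pvFoldB_eq]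
  apply pvStep_foldl_eq_of_mem_iff
  intro x
  constructor
  · intro hx
    rcases List.mem_map.mp hx with ⟨j, hj, hfx⟩
    rcases List.mem_filter.mp hj with ⟨hjf, hgok⟩
    rcases (pvMem_flat words i j).1 hjf with ⟨hji, hham⟩
    refine List.mem_map.mpr ⟨j, List.mem_filter.mpr ⟨List.mem_range.mpr hji, ?_⟩, hfx⟩
    unfold pvHamOK
    rw [Bool.and_eq_true]
    exact ⟨hham, by rw [bne_comm]; exact hgok⟩
  · intro hx
    rcases List.mem_map.mp hx with ⟨j, hj, hfx⟩
    rcases List.mem_filter.mp hj with ⟨hjr, hok⟩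
    have hham := ((Bool.and_eq_true _ _).mp hok).1
    have hgok := ((Bool.and_eq_true _ _).mp hok).2
    refine List.mem_map.mpr ⟨j, List.mem_filter.mpr
      ⟨(pvMem_flat words i j).2 ⟨List.mem_range.mp hjr, hham⟩, by rw [bne_comm]; exact hgok⟩, hfx⟩

-- ----- the joint invariant carried through both outer loops -----
structure PvInv (words : List String) (groups : List Int) (i : Nat)
    (stA : List Int × List Int × Nat)
    (stB : List Int × List Int × PySem.Dict (Int × List Char) (List Nat) × Nat) : Prop where
  dpEq : stB.1 = stA.1
  prevEq : stB.2.1 = stA.2.1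
  mxEq : stB.2.2.2 = stA.2.2
  dpLen : stA.1.length = groups.length
  prevLen : stA.2.1.length = groups.length
  dpHi : ∀ k, i ≤ k → k < groups.length → stA.1.getD k 0 = 1
  prevHi : ∀ k, i ≤ k → k < groups.length → stA.2.1.getD k 0 = -1
  dpPos : ∀ k, k < groups.length → 1 ≤ stA.1.getD k 0
  mxLt : stA.2.2 < max i 1
  mxLtN : stA.2.2 < groups.length
  buckets : ∀ κ, stB.2.2.1.getD κ [] =
    (List.range i).filter (fun j => decide (κ ∈ pvKeys (words.getD j "")))
-- ----- one iteration of Source B's main loop, in the same closed form -----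
theorem pvBBody_eq (words : List String) (groups : List Int) (dp prev : List Int)
    (b : PySem.Dict (Int × List Char) (List Nat)) (best i : Nat)
    (hb : ∀ κ, b.getD κ [] = (List.range i).filter (fun j => decide (κ ∈ pvKeys (words.getD j ""))))
    (hdl : i < dp.length) (hpl : i < prev.length)
    (hdi : dp.getD i 0 = 1) (hpi : prev.getD i 0 = -1)
    (hpos : ∀ k, k < dp.length → 1 ≤ dp.getD k 0)
    (hbi : best = i → i = 0) :
    pvBBody words groups (dp, prev, b, best) i =
      (dp.set i ((pvQ words groups dp i i).1 + 1),
       prev.set i (pvQ words groups dp i i).2,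
       (pvKeys (words.getD i "")).foldl (fun b key => b.insert key (b.getD key [] ++ [i])) b,
       if dp.getD best 0 < (pvQ words groups dp i i).1 + 1 then i else best) := by
  unfold pvBBody
  simp only
  rw [pvBScan_eq words groups dp i b hb]
  set Q := pvQ words groups dp i i with hQ
  by_cases hq1 : Q.1 > 0
  · rw [if_pos hq1, if_pos hq1]
    have hgi : (dp.set i (Q.1 + 1)).getD i 0 = Q.1 + 1 := pvGetD_set_self _ _ _ hdl
    by_cases hbe : best = i
    · exfalso
      have h0 : i = 0 := hbi hbe
      have : Q = (0, -1) := by rw [hQ, h0]; simp [pvQ, pvCandList]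
      rw [this] at hq1
      simp at hq1
    · have hgb : (dp.set i (Q.1 + 1)).getD best 0 = dp.getD best 0 :=
        pvGetD_set_ne _ _ _ _ (fun h => hbe h.symm)
      rw [hgi, hgb]
  · rw [if_neg hq1, if_neg hq1]
    have hQ0 : Q = (0, -1) := by
      rcases pvQ_cases words groups dp i i with h | ⟨j, hj, _, h⟩
      · exact h
      · exact absurd (show Q.1 > 0 by
          rw [hQ, h]; exact lt_of_lt_of_le Int.zero_lt_one (hpos j (by omega))) hq1
    rw [hQ0]
    have e1 : dp.set i (((0 : Int), (-1 : Int)).1 + 1) = dp := by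
      rw [show ((0 : Int), (-1 : Int)).1 + 1 = dp.getD i 0 from by rw [hdi]; norm_num]
      exact pvSet_getD_self _ _ hdl
    have e2 : prev.set i (((0 : Int), (-1 : Int)).2) = prev := by
      rw [show (((0 : Int), (-1 : Int)).2 : Int) = prev.getD i 0 from by rw [hpi]]
      exact pvSet_getD_self _ _ hpl
    rw [e1, e2, hdi]
    norm_num
-- ----- A's outer loop advances by one inner loop -----
theorem pvAStep (words : List String) (groups : List Int)
    (init : List Int × List Int × Nat) (m : Nat) :
    (List.range' 1 (m + 1 - 1)).foldl
        (fun st i' => (List.range i').foldl (pvAInner words groups i') st) init =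
      (List.range m).foldl (pvAInner words groups m)
        ((List.range' 1 (m - 1)).foldl
          (fun st i' => (List.range i').foldl (pvAInner words groups i') st) init) := by
  cases m with
  | zero => simp
  | succ m =>
    have h1 : m + 1 + 1 - 1 = m + 1 := rfl
    have h2 : m + 1 - 1 = m := rfl
    rw [h1, h2, List.range'_1_concat, List.foldl_append, List.foldl_cons, List.foldl_nil]
    rw [show 1 + m = m + 1 from Nat.add_comm 1 m]

-- ----- the main induction: both loops stay in lockstep -----
theorem pvInv_main (words : List String) (groups : List Int) (hn : 1 ≤ groups.length) :
    ∀ i, i ≤ groups.length →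
      PvInv words groups i
        ((List.range' 1 (i - 1)).foldl
          (fun st i' => (List.range i').foldl (pvAInner words groups i') st)
          (List.replicate groups.length 1, List.replicate groups.length (-1), 0))
        ((List.range i).foldl (pvBBody words groups)
          (List.replicate groups.length 1, List.replicate groups.length (-1),
            PySem.Dict.empty, 0)) := by
  intro i
  induction i with
  | zero =>
    intro _
    refine ⟨rfl, rfl, rfl, by simp, by simp, ?_, ?_, ?_, by simp, hn, ?_⟩
    · intro k _ hk; simp [hk]
    · intro k _ hk; simp [hk]
    · intro k hk; simp [hk]
    · intro κ; simp
  | succ i ih =>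
    intro hi1
    have hin : i < groups.length := by omega
    have hInv := ih (by omega)
    rw [List.range_succ, List.foldl_append, List.foldl_cons, List.foldl_nil, pvAStep]
    set SA := (List.range' 1 (i - 1)).foldl
      (fun st i' => (List.range i').foldl (pvAInner words groups i') st)
      (List.replicate groups.length 1, List.replicate groups.length (-1), 0) with hSA
    set SB := (List.range i).foldl (pvBBody words groups)
      (List.replicate groups.length 1, List.replicate groups.length (-1),
        PySem.Dict.empty, 0) with hSB
    -- facts from the invariant
    have hdl : i < SA.1.length := by rw [hInv.dpLen]; exact hin
    have hpl : i < SA.2.1.length := by rw [hInv.prevLen]; exact hin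
    have hdi : SA.1.getD i 0 = 1 := hInv.dpHi i le_rfl hin
    have hpi : SA.2.1.getD i 0 = -1 := hInv.prevHi i le_rfl hin
    have hmd : 1 ≤ SA.1.getD SA.2.2 0 := hInv.dpPos _ hInv.mxLtN
    have hmaxc := max_choice i 1
    have hmx : i = 0 ∨ SA.2.2 < i := by
      have := hInv.mxLt
      rcases hmaxc with h | h <;> omega
    have hbi : SA.2.2 = i → i = 0 := by
      intro h
      have := hInv.mxLt
      rcases hmaxc with h' | h' <;> omega
    have hpos : ∀ k, k < SA.1.length → 1 ≤ SA.1.getD k 0 := by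
      intro k hk; exact hInv.dpPos k (by rwa [hInv.dpLen] at hk)
    -- rewrite the B state through the invariant's component equalities
    have hBst : SB = (SA.1, SA.2.1, SB.2.2.1, SA.2.2) := by
      rw [← hInv.dpEq, ← hInv.prevEq, ← hInv.mxEq]
    -- apply the closed forms on both sides
    rw [hBst, pvBBody_eq words groups SA.1 SA.2.1 SB.2.2.1 SA.2.2 i hInv.buckets
      hdl hpl hdi hpi hpos hbi]
    rw [show SA = (SA.1, SA.2.1, SA.2.2) from rfl,
      pvAInner_eq words groups i SA.1 SA.2.1 SA.2.2 hdl hpl hdi hpi hmx hmd i le_rfl]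
    set Q := pvQ words groups SA.1 i i with hQdef
    have hQnn : 0 ≤ Q.1 := by
      rcases pvQ_cases words groups SA.1 i i with h | ⟨j, hj, _, h⟩
      · rw [hQdef, h]
      · rw [hQdef, h]
        exact le_trans (by norm_num) (hInv.dpPos j (by omega))
    refine ⟨rfl, rfl, rfl, by simp [hInv.dpLen], by simp [hInv.prevLen], ?_, ?_, ?_, ?_, ?_, ?_⟩
    · intro k hk hkn
      rw [pvGetD_set_ne _ _ _ _ (by omega)]
      exact hInv.dpHi k (by omega) hkn
    · intro k hk hkn
      rw [pvGetD_set_ne _ _ _ _ (by omega)]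
      exact hInv.prevHi k (by omega) hkn
    · intro k hkn
      by_cases hki : k = i
      · subst hki
        rw [pvGetD_set_self _ _ _ hdl]
        omega
      · rw [pvGetD_set_ne _ _ _ _ (fun h => hki h.symm)]
        exact hInv.dpPos k hkn
    · by_cases hc : SA.1.getD SA.2.2 0 < Q.1 + 1
      · rw [if_pos hc]
        simp
      · rw [if_neg hc]
        have := hInv.mxLt
        rcases hmaxc with h | h <;> simp <;> omega
    · by_cases hc : SA.1.getD SA.2.2 0 < Q.1 + 1
      · rw [if_pos hc]; exact hin
      · rw [if_neg hc]; exact hInv.mxLtN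
    · intro κ
      rw [pvFoldInsert _ (pvKeys_nodup _) i _ κ, hInv.buckets κ]
      rw [List.range_succ, List.filter_append]
      by_cases hκ : κ ∈ pvKeys (words.getD i "")
      · rw [if_pos hκ]
        have hκ' : κ ∈ pvKeys (words[i]?.getD "") := hκ
        simp [hκ']
      · rw [if_neg hκ]
        have hκ' : κ ∉ pvKeys (words[i]?.getD "") := hκ
        simp [hκ']
-- ----- the two reconstruction loops compute the same list -----
theorem pvRecon_eq (words : List String) (prev : List Int) :
    ∀ fuel m, pvARecon words prev fuel m = pvBRecon words prev fuel m := by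
  intro fuel
  induction fuel with
  | zero => intro m; rfl
  | succ f ih =>
    intro m
    unfold pvARecon pvBRecon
    by_cases h : m ≥ 0
    · rw [if_pos h, if_pos h, ih]
    · rw [if_neg h, if_neg h]

-- ===== VERDICT (by name: the statement is the Claim_ definition above) =====
theorem getWordsInLongestSubsequence_spec : Claim_equal_getWordsInLongestSubsequence := by
  intro words groups _ hpre
  obtain ⟨hne, _⟩ := hpre
  have hn : 1 ≤ groups.length := List.length_pos_iff.mpr hne
  simp only [Spec_getWordsInLongestSubsequence, getWordsInLongestSubsequence,
    getWordsInLongestSubsequence_alt]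
  have hInv := pvInv_main words groups hn groups.length le_rfl
  rw [hInv.prevEq, hInv.mxEq, pvRecon_eq]
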